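-- pv_equiv track=rewrite | github.com/lukas5001/Overseer | statuspage/worker.py | _compute_component_status
-- ===== SOURCE A (Python) =====
-- def _compute_component_status(check_statuses: list[str]) -> str:
--     """Compute component status from its mapped check statuses.
--
--     - All OK → operational
--     - Any WARNING, none CRITICAL → degraded_performance
--     - Any CRITICAL but not all → partial_outage
--     - All CRITICAL/UNKNOWN/NO_DATA → major_outage
--     """
--     if not check_statuses:
--         return "operational"
--
--     has_critical = any(s in ("CRITICAL",) for s in check_statuses)
--     has_warning = any(s in ("WARNING",) for s in check_statuses)
--     all_bad = all(s in ("CRITICAL", "UNKNOWN", "NO_DATA") for s in check_statuses)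
--
--     if all_bad:
--         return "major_outage"
--     if has_critical:
--         return "partial_outage"
--     if has_warning:
--         return "degraded_performance"
--     return "operational"
-- ===== SOURCE B (Python) =====
-- _CATEGORY = {"CRITICAL": "crit", "WARNING": "warn", "UNKNOWN": "bad", "NO_DATA": "bad"}
--
--
-- def _compute_component_status(check_statuses: list[str]) -> str:
--     if not check_statuses:
--         return "operational"
--     cats = {_CATEGORY.get(s, "ok") for s in check_statuses}
--     if "ok" not in cats and "warn" not in cats:
--         return "major_outage"
--     if "crit" in cats:
--         return "partial_outage"
--     if "warn" in cats:
--         return "degraded_performance"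
--     return "operational"
-- ===== Notes on version B (the rewrite author's own statement) =====
-- stated objective: alternative
-- what changed: Instead of A's three any/any/all scans over the raw statuses, B maps each status through a category table (CRITICAL->crit, WARNING->warn, UNKNOWN/NO_DATA->bad, else ok), builds the set of distinct categories present, and reads the verdict off category presence (all_bad becomes: neither ok nor warn occurs).
import Mathlib
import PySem

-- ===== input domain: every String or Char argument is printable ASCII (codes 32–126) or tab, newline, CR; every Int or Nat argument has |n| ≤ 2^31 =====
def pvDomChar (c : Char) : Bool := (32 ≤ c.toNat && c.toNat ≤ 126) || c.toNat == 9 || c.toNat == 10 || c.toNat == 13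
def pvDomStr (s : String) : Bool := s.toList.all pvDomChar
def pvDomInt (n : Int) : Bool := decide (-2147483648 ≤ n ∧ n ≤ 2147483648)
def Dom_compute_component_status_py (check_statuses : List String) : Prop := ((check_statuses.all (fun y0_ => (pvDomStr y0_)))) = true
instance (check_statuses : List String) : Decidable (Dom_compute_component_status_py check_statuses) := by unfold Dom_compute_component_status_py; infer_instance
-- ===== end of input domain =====

-- B replaces A's three any/any/all scans with a category table: each status is mapped to
-- crit/warn/bad/ok, the distinct categories present are collected into a set, and the verdict
-- is read off category presence (alternative decomposition, same O(n) cost).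


-- ===== PORT A =====
def compute_component_status_py (check_statuses : List String) : String :=
  if check_statuses.isEmpty then "operational"
  else
    let has_critical := check_statuses.any (fun s => s == "CRITICAL")
    let has_warning := check_statuses.any (fun s => s == "WARNING")
    let all_bad := check_statuses.all (fun s => s == "CRITICAL" || s == "UNKNOWN" || s == "NO_DATA")
    if all_bad then "major_outage"
    else if has_critical then "partial_outage"
    else if has_warning then "degraded_performance"
    else "operational"

-- ===== PORT B =====
-- Source B's module-level category table _CATEGORY
def ccsCategory : PySem.Dict String String :=
  PySem.Dict.ofList [("CRITICAL", "crit"), ("WARNING", "warn"), ("UNKNOWN", "bad"), ("NO_DATA", "bad")]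

def compute_component_status_py_alt (check_statuses : List String) : String :=
  if check_statuses.isEmpty then "operational"
  else
    -- set comprehension {_CATEGORY.get(s, "ok") for s in check_statuses}
    let cats : PySem.Set String :=
      PySem.Set.ofList (check_statuses.map (fun s => ccsCategory.getD s "ok"))
    if !(cats.contains "ok") && !(cats.contains "warn") then "major_outage"
    else if cats.contains "crit" then "partial_outage"
    else if cats.contains "warn" then "degraded_performance"
    else "operational"

-- ===== PRECONDITION & SPEC =====
def Spec_compute_component_status_py (check_statuses : List String) (out : String) : Prop := out = compute_component_status_py_alt check_statuses
instance (check_statuses : List String) (out : String) : Decidable (Spec_compute_component_status_py check_statuses out) := by unfold Spec_compute_component_status_py; infer_instance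

-- ===== CLAIM (what is proved, stated in full; the proofs are below) =====
def Claim_equal_compute_component_status_py : Prop := ∀ (check_statuses : List String), Dom_compute_component_status_py check_statuses → Spec_compute_component_status_py check_statuses (compute_component_status_py check_statuses)

-- ===== LEMMAS AND PROOFS =====

lemma ccs_items : ccsCategory.items = [("CRITICAL","crit"),("WARNING","warn"),("UNKNOWN","bad"),("NO_DATA","bad")] := by rfl

-- the category table evaluated on an arbitrary key
lemma ccs_eval (s : String) : ccsCategory.getD s "ok" =
    if s = "CRITICAL" then "crit" else if s = "WARNING" then "warn"
    else if s = "UNKNOWN" then "bad" else if s = "NO_DATA" then "bad" else "ok" := by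
  by_cases h1 : s = "CRITICAL"
  · subst h1; decide
  by_cases h2 : s = "WARNING"
  · subst h2; decide
  by_cases h3 : s = "UNKNOWN"
  · subst h3; decide
  by_cases h4 : s = "NO_DATA"
  · subst h4; decide
  have e1 : ("CRITICAL" == s) = false := beq_eq_false_iff_ne.mpr (Ne.symm h1)
  have e2 : ("WARNING" == s) = false := beq_eq_false_iff_ne.mpr (Ne.symm h2)
  have e3 : ("UNKNOWN" == s) = false := beq_eq_false_iff_ne.mpr (Ne.symm h3)
  have e4 : ("NO_DATA" == s) = false := beq_eq_false_iff_ne.mpr (Ne.symm h4)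
  simp [PySem.Dict.getD, PySem.Dict.get?, ccs_items, List.find?, e1, e2, e3, e4, h1, h2, h3, h4]

-- a category c is present in B's set iff some status maps to it
lemma ccs_cat_mem (xs : List String) (c : String) :
    (PySem.Set.ofList (xs.map (fun s => ccsCategory.getD s "ok"))).contains c
      = xs.any (fun s => ccsCategory.getD s "ok" == c) := by
  rw [Bool.eq_iff_iff]
  simp [pysem, List.any_eq_true]

-- per-element readings of the three category tests
lemma ccs_cat_crit (s : String) : (ccsCategory.getD s "ok" == "crit") = (s == "CRITICAL") := by
  rw [ccs_eval]; split_ifs with a b c d <;> simp_all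

lemma ccs_cat_warn (s : String) : (ccsCategory.getD s "ok" == "warn") = (s == "WARNING") := by
  rw [ccs_eval]; split_ifs with a b c d <;> simp_all

lemma ccs_cat_not_ok_warn (s : String) :
    (!(ccsCategory.getD s "ok" == "ok") && !(ccsCategory.getD s "ok" == "warn"))
      = (s == "CRITICAL" || s == "UNKNOWN" || s == "NO_DATA") := by
  rw [ccs_eval]; split_ifs with a b c d <;> simp_all

-- De Morgan over the list: neither "ok" nor "warn" present = every element passes both tests
lemma ccs_not_any_pair (xs : List String) (p q : String → Bool) :
    (!xs.any p && !xs.any q) = xs.all (fun s => !p s && !q s) := by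
  induction xs with
  | nil => rfl
  | cons x xs ih =>
    simp only [List.any_cons, List.all_cons, ← ih]
    cases p x <;> cases q x <;> cases xs.any p <;> cases xs.any q <;> rfl

-- ===== VERDICT (by name: the statement is the Claim_ definition above) =====
theorem compute_component_status_py_spec : Claim_equal_compute_component_status_py := by
  intro xs _
  unfold Spec_compute_component_status_py compute_component_status_py compute_component_status_py_alt
  by_cases h : xs.isEmpty
  · simp [h]
  · simp only [h, ccs_cat_mem]
    rw [ccs_not_any_pair,
        List.all_congr rfl (fun s => ccs_cat_not_ok_warn s),
        List.any_congr rfl (fun s => ccs_cat_crit s),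
        List.any_congr rfl (fun s => ccs_cat_warn s)]
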